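-- pv_equiv track=rewrite | github.com/dan-k-k/GTO-Poker-AI | app/feature_extractor.py | _find_best_board_straight_draw
-- ===== SOURCE A (Python) =====
-- def _find_best_board_straight_draw(community_cards: list) -> tuple:
--     """
--     Analyzes community cards to find the best possible straight draw.
--     Returns: (draw_type, completing_ranks)
--     - draw_type: 'OESD', 'gutshot', or None
--     - completing_ranks: A list of card ranks that would complete the draw.
--     """
--     if len(community_cards) < 3:
--         return None, []
--
--     ranks = sorted(list(set([c // 4 for c in community_cards])))
--     # Add Ace for A-2-3-4-5 straights
--     if 12 in ranks:
--         ranks.insert(0, -1) # Use -1 for the low Ace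
--
--     # 1. Prioritize 4-card open-ended draws (e.g., 5-6-7-8)
--     for i in range(len(ranks) - 3):
--         four_ranks = ranks[i:i+4]
--         if four_ranks[3] - four_ranks[0] == 3: # Consecutive
--             low_rank = four_ranks[0]
--             high_rank = four_ranks[3]
--             completing = []
--             if low_rank > -1: completing.append(low_rank - 1)
--             if high_rank < 12: completing.append(high_rank + 1)
--             # Handle A-2-3-4 case
--             if low_rank == 0 and high_rank == 3: completing.append(12)
--             return 'OESD', completing
--
--     # 2. Check for 4-card gutshot draws (e.g., 5-6-8-9)
--     for i in range(len(ranks) - 3):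
--         four_ranks = ranks[i:i+4]
--         if four_ranks[3] - four_ranks[0] == 4 and len(set(four_ranks)) == 4:
--             # The missing rank is the completing card
--             all_possible = set(range(four_ranks[0], four_ranks[3] + 1))
--             completing = list(all_possible - set(four_ranks))
--             return 'gutshot', completing
--
--     # 3. Check for 3-card open-ended draws (e.g., 5-6-7)
--     for i in range(len(ranks) - 2):
--         three_ranks = ranks[i:i+3]
--         if three_ranks[2] - three_ranks[0] == 2: # Consecutive
--             # This is a simplification. Assume it's open-ended.
--             return 'OESD', [three_ranks[0] - 1, three_ranks[2] + 1]
--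
--     # 4. Check for 3-card gutshot draws (e.g., 5-7-8)
--     for i in range(len(ranks) - 2):
--         three_ranks = ranks[i:i+3]
--         if three_ranks[2] - three_ranks[0] in [3, 4]: # One or two gaps
--             # This is a simplification, but captures the essence
--             return 'gutshot', [r for r in range(three_ranks[0]+1, three_ranks[2])]
--
--     return None, []
-- ===== SOURCE B (Python) =====
-- def _find_best_board_straight_draw(community_cards: list) -> tuple:
--     # Membership-driven re-implementation: one rank set + sorted order, each
--     # prioritized pass tests candidate straight windows by set membership in
--     # rank-value space instead of slicing windows out of the sorted list.
--     if len(community_cards) < 3: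
--         return None, []
--
--     rset = {c // 4 for c in community_cards}
--     if 12 in rset:
--         rset.add(-1)  # low Ace for A-2-3-4-5
--     order = sorted(rset)
--
--     # 1. 4-card open-ended: v, v+1, v+2, v+3 all present
--     for v in order:
--         if v + 1 in rset and v + 2 in rset and v + 3 in rset:
--             completing = []
--             if v > -1:
--                 completing.append(v - 1)
--             if v + 3 < 12:
--                 completing.append(v + 4)
--             if v == 0:  # A-2-3-4 (window 0..3)
--                 completing.append(12)
--             return 'OESD', completing
--
--     # 2. 4-card gutshot: endpoints v and v+4 present, exactly one interior rank missing
--     for v in order: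
--         if v + 4 in rset and (v + 1 in rset) + (v + 2 in rset) + (v + 3 in rset) == 2:
--             missing = next(r for r in (v + 1, v + 2, v + 3) if r not in rset)
--             return 'gutshot', [missing]
--
--     # 3. 3-card open-ended: v, v+1, v+2 present
--     for v in order:
--         if v + 1 in rset and v + 2 in rset:
--             return 'OESD', [v - 1, v + 3]
--
--     # 4. 3-card gutshot: window v .. v+3 (one hole) or v .. v+4 (two holes)
--     for v in order:
--         if v + 3 in rset and (v + 1 in rset) + (v + 2 in rset) == 1:
--             return 'gutshot', [v + 1, v + 2]
--         if v + 4 in rset and (v + 1 in rset) + (v + 2 in rset) + (v + 3 in rset) == 1: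
--             return 'gutshot', [v + 1, v + 2, v + 3]
--
--     return None, []
-- ===== Notes on version B (the rewrite author's own statement) =====
-- stated objective: alternative
-- what changed: Replaces A's index-window scans over slices of the sorted rank list by membership-driven scans: a rank set is built once and each prioritized pass tests candidate straight windows in rank-value space (endpoints present, counted interior holes) instead of slicing ranks[i:i+4]/[i:i+3] and comparing span.
-- outside the precondition, e.g. on _find_best_board_straight_draw([-20, 0, 4, 8, 12, 48]): A returns ('OESD', [-1, 4, 12]), B returns ('OESD', [3])
import Mathlib
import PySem

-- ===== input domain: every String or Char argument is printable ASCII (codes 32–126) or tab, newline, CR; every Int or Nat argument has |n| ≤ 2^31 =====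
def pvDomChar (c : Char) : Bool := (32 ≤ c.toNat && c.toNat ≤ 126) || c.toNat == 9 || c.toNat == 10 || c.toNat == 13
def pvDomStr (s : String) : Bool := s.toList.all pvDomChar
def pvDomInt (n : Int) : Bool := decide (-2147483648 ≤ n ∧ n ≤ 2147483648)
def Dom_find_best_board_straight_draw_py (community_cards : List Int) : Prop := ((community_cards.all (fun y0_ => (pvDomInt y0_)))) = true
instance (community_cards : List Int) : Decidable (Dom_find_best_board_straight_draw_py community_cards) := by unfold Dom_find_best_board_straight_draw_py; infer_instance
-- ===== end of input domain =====

-- B replaces A's index-window scans over slices of the sorted rank list by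
-- membership-driven scans of candidate straight windows in rank-value space
-- (objective: alternative decomposition, same asymptotic cost).

-- ===== PORT A =====

-- ranks = sorted(list(set(c//4 for c in community_cards))); insert -1 at the front if 12 present
def aRanks (community_cards : List Int) : List Int :=
  let ranks0 := PySem.List.sorted (PySem.Set.ofList (community_cards.map (fun c => PySem.Int.floordiv c 4))) (fun x => x) false
  if (12 : Int) ∈ ranks0 then (-1) :: ranks0 else ranks0

-- body of pass 1: four_ranks = ranks[i:i+4]; the slice has exactly 4 elements for i in range(len-3)
def aWin4o (w : List Int) : Option (Option String × List Int) :=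
  match w with
  | [r0, _, _, r3] =>
      if r3 - r0 = 3 then
        some (some "OESD",
          (if r0 > -1 then [r0 - 1] else []) ++
          (if r3 < 12 then [r3 + 1] else []) ++
          (if r0 = 0 ∧ r3 = 3 then [(12 : Int)] else []))
      else none
  | _ => none

-- body of pass 2; `list(all_possible - set(four_ranks))` is ported as the ordered set
-- difference (whenever the branch fires on a sorted distinct window it is a singleton,
-- so Python's set iteration order is determined)
def aWin4g (w : List Int) : Option (Option String × List Int) :=
  match w with
  | [r0, r1, r2, r3] =>
      if r3 - r0 = 4 ∧ (PySem.Set.ofList [r0, r1, r2, r3]).length = 4 then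
        some (some "gutshot",
          PySem.Set.diff (PySem.Set.ofList (PySem.List.pyRange r0 (r3 + 1) 1)) (PySem.Set.ofList [r0, r1, r2, r3]))
      else none
  | _ => none

-- body of pass 3
def aWin3o (w : List Int) : Option (Option String × List Int) :=
  match w with
  | [r0, _, r2] =>
      if r2 - r0 = 2 then some (some "OESD", [r0 - 1, r2 + 1]) else none
  | _ => none

-- body of pass 4; completing = list(range(three[0]+1, three[2]))
def aWin3g (w : List Int) : Option (Option String × List Int) :=
  match w with
  | [r0, _, r2] =>
      if r2 - r0 = 3 ∨ r2 - r0 = 4 then some (some "gutshot", PySem.List.pyRange (r0 + 1) r2 1) else none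
  | _ => none

def aPass1 (ranks : List Int) : Option (Option String × List Int) :=
  (PySem.List.pyRange 0 ((ranks.length : Int) - 3) 1).findSome?
    (fun i => aWin4o (PySem.List.slice ranks (some i) (some (i + 4))))

def aPass2 (ranks : List Int) : Option (Option String × List Int) :=
  (PySem.List.pyRange 0 ((ranks.length : Int) - 3) 1).findSome?
    (fun i => aWin4g (PySem.List.slice ranks (some i) (some (i + 4))))

def aPass3 (ranks : List Int) : Option (Option String × List Int) :=
  (PySem.List.pyRange 0 ((ranks.length : Int) - 2) 1).findSome?
    (fun i => aWin3o (PySem.List.slice ranks (some i) (some (i + 3))))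

def aPass4 (ranks : List Int) : Option (Option String × List Int) :=
  (PySem.List.pyRange 0 ((ranks.length : Int) - 2) 1).findSome?
    (fun i => aWin3g (PySem.List.slice ranks (some i) (some (i + 3))))

def find_best_board_straight_draw_py (community_cards : List Int) : Option String × List Int :=
  if community_cards.length < 3 then (none, []) else
  let ranks := aRanks community_cards
  ((((aPass1 ranks).or (aPass2 ranks)).or ((aPass3 ranks).or (aPass4 ranks))).getD (none, []))

-- ===== PORT B =====

-- rset = {c // 4 for c in community_cards}; rset.add(-1) if 12 in rset
def bRset (community_cards : List Int) : PySem.Set Int :=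
  let rset0 := PySem.Set.ofList (community_cards.map (fun c => PySem.Int.floordiv c 4))
  if (12 : Int) ∈ rset0 then PySem.Set.add rset0 (-1) else rset0

-- pass-1 body: v, v+1, v+2, v+3 all present
def bStep1 (rset : PySem.Set Int) (v : Int) : Option (Option String × List Int) :=
  if v + 1 ∈ rset ∧ v + 2 ∈ rset ∧ v + 3 ∈ rset then
    some (some "OESD",
      (if v > -1 then [v - 1] else []) ++
      (if v + 3 < 12 then [v + 4] else []) ++
      (if v = 0 then [(12 : Int)] else []))
  else none

-- pass-2 body: endpoints v, v+4 present, exactly one interior rank missing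
def bStep2 (rset : PySem.Set Int) (v : Int) : Option (Option String × List Int) :=
  if v + 4 ∈ rset ∧
     ((if v + 1 ∈ rset then 1 else 0) + (if v + 2 ∈ rset then 1 else 0) +
      (if v + 3 ∈ rset then 1 else 0) : Int) = 2 then
    -- missing = next(r for r in (v+1, v+2, v+3) if r not in rset); the generator always finds one here
    match [v + 1, v + 2, v + 3].find? (fun r => decide (r ∉ rset)) with
    | some m => some (some "gutshot", [m])
    | none => none
  else none

-- pass-3 body: v, v+1, v+2 present
def bStep3 (rset : PySem.Set Int) (v : Int) : Option (Option String × List Int) :=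
  if v + 1 ∈ rset ∧ v + 2 ∈ rset then some (some "OESD", [v - 1, v + 3]) else none

-- pass-4 body: window v..v+3 with one hole, else window v..v+4 with two holes
def bStep4 (rset : PySem.Set Int) (v : Int) : Option (Option String × List Int) :=
  if v + 3 ∈ rset ∧ ((if v + 1 ∈ rset then 1 else 0) + (if v + 2 ∈ rset then 1 else 0) : Int) = 1 then
    some (some "gutshot", [v + 1, v + 2])
  else if v + 4 ∈ rset ∧
     ((if v + 1 ∈ rset then 1 else 0) + (if v + 2 ∈ rset then 1 else 0) +
      (if v + 3 ∈ rset then 1 else 0) : Int) = 1 then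
    some (some "gutshot", [v + 1, v + 2, v + 3])
  else none

def find_best_board_straight_draw_py_alt (community_cards : List Int) : Option String × List Int :=
  if community_cards.length < 3 then (none, []) else
  let rset := bRset community_cards
  let order := PySem.List.sorted rset (fun x => x) false
  ((((order.findSome? (bStep1 rset)).or (order.findSome? (bStep2 rset))).or
    ((order.findSome? (bStep3 rset)).or (order.findSome? (bStep4 rset)))).getD (none, []))

-- ===== PRECONDITION & SPEC =====
-- Pre_ excludes lists that contain an Ace-rank card (c//4 = 12) together with a negative
-- card: there A's `ranks.insert(0, -1)` lands the low Ace out of order (or duplicates a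
-- rank of -1) and A's value is an artefact of that broken ordering; card codes are
-- naturally the nonnegative range 0–51.
def Pre_find_best_board_straight_draw_py (community_cards : List Int) : Prop :=
  (∃ c ∈ community_cards, PySem.Int.floordiv c 4 = 12) → ∀ c ∈ community_cards, 0 ≤ c
instance (community_cards : List Int) : Decidable (Pre_find_best_board_straight_draw_py community_cards) := by
  unfold Pre_find_best_board_straight_draw_py; infer_instance

def pvWitness_find_best_board_straight_draw_py : List Int := [0, 5, 9, 48]

def Spec_find_best_board_straight_draw_py (community_cards : List Int) (out : Option String × List Int) : Prop := out = find_best_board_straight_draw_py_alt community_cards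
instance (community_cards : List Int) (out : Option String × List Int) : Decidable (Spec_find_best_board_straight_draw_py community_cards out) := by unfold Spec_find_best_board_straight_draw_py; infer_instance

-- ===== CLAIM (what is proved, stated in full; the proofs are below) =====
def Claim_equal_find_best_board_straight_draw_py : Prop := ∀ (community_cards : List Int), Dom_find_best_board_straight_draw_py community_cards → Pre_find_best_board_straight_draw_py community_cards → Spec_find_best_board_straight_draw_py community_cards (find_best_board_straight_draw_py community_cards)

-- ===== LEMMAS AND PROOFS =====

-- strict monotonicity of getElem on a strictly sorted list
theorem pvGetMono {l : List Int} (hl : l.Pairwise (· < ·)) {i j : ℕ}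
    (hi : i < l.length) (hj : j < l.length) (hij : i < j) : l[i] < l[j] :=
  List.pairwise_iff_getElem.mp hl i j hi hj hij

-- on a strictly sorted list: l[i+1] = w iff w is the least member above l[i]
theorem pvStep {l : List Int} (hl : l.Pairwise (· < ·)) {i : ℕ} (hi : i < l.length) {w : Int} :
    (∃ h : i + 1 < l.length, l[i + 1] = w) ↔
      (w ∈ l ∧ l[i] < w ∧ ∀ u : Int, l[i] < u → u < w → u ∉ l) := by
  constructor
  · rintro ⟨h, rfl⟩
    refine ⟨List.getElem_mem h, pvGetMono hl hi h (by omega), ?_⟩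
    intro u hu1 hu2 humem
    obtain ⟨j, hj, rfl⟩ := List.mem_iff_getElem.mp humem
    rcases Nat.lt_trichotomy j (i + 1) with hlt | heq | hgt
    · rcases Nat.lt_or_ge j i with hji | hji
      · exact absurd (pvGetMono hl hj hi hji) (by omega)
      · have : j = i := by omega
        subst this; omega
    · subst heq; omega
    · exact absurd (pvGetMono hl h hj hgt) (by omega)
  · rintro ⟨hmem, hlt, hempty⟩
    obtain ⟨j, hj, rfl⟩ := List.mem_iff_getElem.mp hmem
    have hij : i < j := by
      rcases Nat.lt_trichotomy i j with h | h | h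
      · exact h
      · subst h; omega
      · exact absurd (pvGetMono hl hj hi h) (by omega)
    have hj1 : i + 1 < l.length := by omega
    refine ⟨hj1, ?_⟩
    rcases Nat.lt_trichotomy (i + 1) j with h | h | h
    · exact absurd (List.getElem_mem hj1)
        (hempty l[i + 1] (pvGetMono hl hi hj1 (by omega)) (pvGetMono hl hj1 hj h))
    · subst h; rfl
    · omega

-- no member of l lies strictly between two consecutive entries
theorem pvGap {l : List Int} (hl : l.Pairwise (· < ·)) {i : ℕ} (h : i + 1 < l.length) :
    ∀ u : Int, l[i] < u → u < l[i + 1] → u ∉ l :=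
  ((pvStep hl (by omega) (w := l[i + 1])).mp ⟨h, rfl⟩).2.2

-- window extraction
theorem pvDrop4 (l : List Int) {i : ℕ} (hi : i + 3 < l.length) :
    (l.drop i).take 4 = [l[i], l[i + 1], l[i + 2], l[i + 3]] := by
  rw [List.drop_eq_getElem_cons (by omega : i < l.length),
      List.drop_eq_getElem_cons (by omega : i + 1 < l.length),
      List.drop_eq_getElem_cons (by omega : i + 2 < l.length),
      List.drop_eq_getElem_cons (by omega : i + 3 < l.length)]
  simp [List.take]

theorem pvDrop3 (l : List Int) {i : ℕ} (hi : i + 2 < l.length) :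
    (l.drop i).take 3 = [l[i], l[i + 1], l[i + 2]] := by
  rw [List.drop_eq_getElem_cons (by omega : i < l.length),
      List.drop_eq_getElem_cons (by omega : i + 1 < l.length),
      List.drop_eq_getElem_cons (by omega : i + 2 < l.length)]
  simp [List.take]

-- generic bridge: A's index scan over range(len-k) equals B's element scan,
-- given pointwise agreement (both none past the end)
theorem pvFindSomeCongr {α β : Type} (l : List α) (f g : α → Option β)
    (h : ∀ a ∈ l, f a = g a) : l.findSome? f = l.findSome? g := by
  induction l with
  | nil => rfl
  | cons x xs ih =>
    simp only [List.findSome?_cons, h x (List.mem_cons_self), ih (fun a ha => h a (List.mem_cons_of_mem _ ha))]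

theorem pvRangeFind {α β : Type} (l : List α) (G : α → Option β) :
    (List.range l.length).findSome? (fun j => (l[j]?).bind G) = l.findSome? G := by
  induction l with
  | nil => rfl
  | cons x xs ih =>
    rw [List.length_cons, List.range_succ_eq_map, List.findSome?_cons, List.findSome?_map]
    simp only [List.getElem?_cons_zero, Option.bind_some] -- hmm
    cases hx : G x with
    | some b => simp [hx]
    | none =>
      simp only []
      have : ((fun j => ((x :: xs)[j]?).bind G) ∘ Nat.succ) = (fun j => (xs[j]?).bind G) := by
        funext j; simp
      rw [this, ih]
      simp [hx]

theorem pvRangeExtend {β : Type} (m n : ℕ) (f : ℕ → Option β) (hmn : m ≤ n)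
    (h : ∀ j, m ≤ j → j < n → f j = none) :
    (List.range m).findSome? f = (List.range n).findSome? f := by
  have : n = m + (n - m) := by omega
  rw [this, List.range_add, List.findSome?_append]
  have hnone : ((List.range (n - m)).map (fun x => m + x)).findSome? f = none := by
    rw [List.findSome?_eq_none_iff]
    intro x hx
    obtain ⟨j, hj, rfl⟩ := List.mem_map.mp hx
    exact h _ (by omega) (by have := List.mem_range.mp hj; omega)
  rw [List.findSome?_map] at hnone
  rw [List.findSome?_map, hnone]
  cases (List.range m).findSome? f <;> rfl

theorem pvScanBridge {β : Type} (l : List Int) (k : ℕ)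
    (F : Int → Option β) (G : Int → Option β)
    (h : ∀ i : ℕ, (hi : i < l.length) → F (i : Int) = G l[i])
    (h2 : ∀ i : ℕ, (hi : i < l.length) → l.length ≤ i + k → G l[i] = none) :
    (PySem.List.pyRange 0 ((l.length : Int) - k) 1).findSome? F = l.findSome? G := by
  rw [PySem.List.pyRange_one, List.findSome?_map]
  have hm : (((l.length : Int) - k) - 0).toNat = l.length - k := by omega
  rw [hm]
  have e1 : ∀ j ∈ List.range (l.length - k),
      (F ∘ fun t : ℕ => (0 : Int) + (t : Int)) j = (fun j : ℕ => (l[j]?).bind G) j := by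
    intro j hj
    have hjl : j < l.length := by have := List.mem_range.mp hj; omega
    simp only [Function.comp, zero_add]
    rw [h j hjl, List.getElem?_eq_getElem hjl, Option.bind_some]
  rw [pvFindSomeCongr _ _ _ e1, pvRangeExtend (l.length - k) l.length _ (by omega), pvRangeFind]
  intro j hj1 hj2
  rw [List.getElem?_eq_getElem hj2, Option.bind_some]
  exact h2 j hj2 (by omega)

-- sorted-set bookkeeping: under Pre_, B's sorted order IS A's ranks list,
-- A's ranks list is strictly increasing, and rset has the same members
theorem pvRanks (community_cards : List Int)
    (hPre : Pre_find_best_board_straight_draw_py community_cards) :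
    PySem.List.sorted (bRset community_cards) (fun x => x) false = aRanks community_cards ∧
    (aRanks community_cards).Pairwise (· < ·) ∧
    (∀ x : Int, x ∈ bRset community_cards ↔ x ∈ aRanks community_cards) := by
  unfold aRanks bRset
  set rs := community_cards.map (fun c => PySem.Int.floordiv c 4) with hrs
  set S := PySem.Set.ofList rs with hSdef
  set r0 := PySem.List.sorted S (fun x => x) false with hr0
  have hperm : r0.Perm S := PySem.List.sorted_perm S (fun x => x) false
  have hp0 : r0.Pairwise (· < ·) := PySem.List.sorted_ofList_pairwise_lt rs
  have h12iff : ((12 : Int) ∈ r0) ↔ ((12 : Int) ∈ S) := PySem.List.mem_sorted S (fun x => x) false 12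
  by_cases h12 : (12 : Int) ∈ S
  · -- Ace present: all ranks are nonnegative, -1 is prepended
    have hPre' : ∀ c ∈ community_cards, 0 ≤ c := by
      apply hPre
      obtain ⟨c, hc, hceq⟩ := List.mem_map.mp ((PySem.Set.mem_ofList rs 12).mp h12)
      exact ⟨c, hc, hceq⟩
    have hpos : ∀ x ∈ S, 0 ≤ x := by
      intro x hx
      obtain ⟨c, hc, rfl⟩ := List.mem_map.mp ((PySem.Set.mem_ofList rs x).mp hx)
      rw [PySem.Int.floordiv_eq_ediv_of_pos (by norm_num)]
      exact Int.ediv_nonneg (hPre' c hc) (by norm_num)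
    have hm1 : (-1 : Int) ∉ S := fun h => absurd (hpos _ h) (by norm_num)
    have hadd : PySem.Set.add S (-1) = S ++ [(-1 : Int)] := PySem.Set.add_of_not_mem hm1
    have hpair : ((-1 : Int) :: r0).Pairwise (· < ·) := by
      refine List.Pairwise.cons ?_ hp0
      intro y hy
      have : y ∈ S := (PySem.List.mem_sorted S (fun x => x) false y).mp hy
      have := hpos y this
      omega
    have hsorted : PySem.List.sorted (PySem.Set.add S (-1)) (fun x => x) false = (-1 : Int) :: r0 := by
      rw [hadd]
      apply PySem.List.sorted_eq_of_perm_of_pairwise_lt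
      · exact ((hperm.cons (-1)).trans (List.perm_append_singleton (-1) S).symm)
      · exact hpair
    rw [if_pos h12, if_pos (h12iff.mpr h12)]
    refine ⟨hsorted, hpair, ?_⟩
    intro x
    rw [hadd]
    constructor
    · intro hx
      rcases List.mem_append.mp hx with hx | hx
      · exact List.mem_cons_of_mem _ ((PySem.List.mem_sorted S (fun x => x) false x).mpr hx)
      · simp at hx; simp [hx]
    · intro hx
      rcases List.mem_cons.mp hx with hx | hx
      · simp [hx]
      · exact List.mem_append.mpr (Or.inl ((PySem.List.mem_sorted S (fun x => x) false x).mp hx))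
  · rw [if_neg h12, if_neg (fun h => h12 (h12iff.mp h))]
    exact ⟨rfl, hp0, fun x => (PySem.List.mem_sorted S (fun x => x) false x).symm⟩

theorem pvShort4o (w : List Int) (h : w.length ≠ 4) : aWin4o w = none := by
  rcases w with _ | ⟨a, _ | ⟨b, _ | ⟨c, _ | ⟨d, _ | ⟨e, tl⟩⟩⟩⟩⟩ <;> simp_all [aWin4o]

theorem pvShort4g (w : List Int) (h : w.length ≠ 4) : aWin4g w = none := by
  rcases w with _ | ⟨a, _ | ⟨b, _ | ⟨c, _ | ⟨d, _ | ⟨e, tl⟩⟩⟩⟩⟩ <;> simp_all [aWin4g]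

theorem pvShort3o (w : List Int) (h : w.length ≠ 3) : aWin3o w = none := by
  rcases w with _ | ⟨a, _ | ⟨b, _ | ⟨c, _ | ⟨d, tl⟩⟩⟩⟩ <;> simp_all [aWin3o]

theorem pvShort3g (w : List Int) (h : w.length ≠ 3) : aWin3g w = none := by
  rcases w with _ | ⟨a, _ | ⟨b, _ | ⟨c, _ | ⟨d, tl⟩⟩⟩⟩ <;> simp_all [aWin3g]

-- pass equalities
-- pointwise pass lemmas (l strictly sorted)
theorem pvPt1 {l : List Int} (hl : l.Pairwise (· < ·)) {i : ℕ} (hi : i < l.length) :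
    aWin4o ((l.drop i).take 4) = bStep1 l l[i] := by
  by_cases hc : l[i] + 1 ∈ l ∧ l[i] + 2 ∈ l ∧ l[i] + 3 ∈ l
  · obtain ⟨h1m, h2m, h3m⟩ := hc
    obtain ⟨hi1, e1⟩ := (pvStep hl hi).mpr ⟨h1m, by omega, fun u h1 h2 => absurd h1 (by omega)⟩
    obtain ⟨hi2, e2⟩ := (pvStep hl hi1).mpr
      ⟨h2m, by rw [e1]; omega, fun u h1 h2 => absurd (e1 ▸ h1) (by omega)⟩
    replace hi2 : i + 2 < l.length := hi2
    replace e2 : l[i + 2] = l[i] + 2 := e2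
    obtain ⟨hi3, e3⟩ := (pvStep hl hi2).mpr
      ⟨h3m, by rw [e2]; omega, fun u h1 h2 => absurd (e2 ▸ h1) (by omega)⟩
    replace hi3 : i + 3 < l.length := hi3
    replace e3 : l[i + 3] = l[i] + 3 := e3
    rw [pvDrop4 l hi3, e1, e2, e3]
    simp only [aWin4o]
    rw [if_pos (by omega)]
    have hcond : l[i] + 1 ∈ l ∧ l[i] + 2 ∈ l ∧ l[i] + 3 ∈ l := ⟨h1m, h2m, h3m⟩
    rw [bStep1, if_pos hcond]
    have h34 : l[i] + 3 + 1 = l[i] + 4 := by omega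
    have hc3 : (l[i] = 0 ∧ l[i] + 3 = 3) ↔ (l[i] = 0) := by constructor <;> intro h <;> [exact h.1; exact ⟨h, by omega⟩]
    rw [h34]
    simp only [hc3]
  · rw [bStep1, if_neg hc]
    by_cases hlen : i + 3 < l.length
    · rw [pvDrop4 l hlen]
      simp only [aWin4o]
      rw [if_neg]
      intro hspan
      have a1 : l[i] < l[i + 1] := pvGetMono hl hi (by omega) (by omega)
      have a2 : l[i + 1] < l[i + 2] := pvGetMono hl (by omega) (by omega) (by omega)
      have a3 : l[i + 2] < l[i + 3] := pvGetMono hl (by omega) (by omega) (by omega)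
      refine hc ⟨?_, ?_, ?_⟩
      · have := List.getElem_mem (show i + 1 < l.length by omega)
        rwa [show l[i + 1] = l[i] + 1 by omega] at this
      · have := List.getElem_mem (show i + 2 < l.length by omega)
        rwa [show l[i + 2] = l[i] + 2 by omega] at this
      · have := List.getElem_mem (show i + 3 < l.length by omega)
        rwa [show l[i + 3] = l[i] + 3 by omega] at this
    · rw [pvShort4o _ (by simp only [List.length_take, List.length_drop]; omega)]

theorem pvRange5 (v : Int) : PySem.List.pyRange v (v + 5) 1 = [v, v + 1, v + 2, v + 3, v + 4] := by
  rw [PySem.List.pyRange_one_cons (by omega), PySem.List.pyRange_one_cons (by omega),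
      PySem.List.pyRange_one_cons (by omega), PySem.List.pyRange_one_cons (by omega),
      PySem.List.pyRange_one_cons (by omega), PySem.List.pyRange_one_eq_nil (by omega)]
  simp only [List.cons.injEq]
  and_intros <;> first | trivial | omega

theorem pvRange2 (v : Int) : PySem.List.pyRange (v + 1) (v + 3) 1 = [v + 1, v + 2] := by
  rw [PySem.List.pyRange_one_cons (by omega), PySem.List.pyRange_one_cons (by omega),
      PySem.List.pyRange_one_eq_nil (by omega)]
  simp only [List.cons.injEq]
  and_intros <;> first | trivial | omega

theorem pvRange3 (v : Int) : PySem.List.pyRange (v + 1) (v + 4) 1 = [v + 1, v + 2, v + 3] := by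
  rw [PySem.List.pyRange_one_cons (by omega), PySem.List.pyRange_one_cons (by omega),
      PySem.List.pyRange_one_cons (by omega), PySem.List.pyRange_one_eq_nil (by omega)]
  simp only [List.cons.injEq]
  and_intros <;> first | trivial | omega

theorem pvOfList4 (a b c d : Int) (h1 : a < b) (h2 : b < c) (h3 : c < d) :
    PySem.Set.ofList [a, b, c, d] = [a, b, c, d] := by
  apply PySem.Set.ofList_eq_self_of_nodup
  simp only [List.nodup_cons, List.mem_cons, List.not_mem_nil, List.nodup_nil,
    or_false, and_true, not_or, not_false_eq_true]
  omega

theorem pvOfList5 (a b c d e : Int) (h1 : a < b) (h2 : b < c) (h3 : c < d) (h4 : d < e) :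
    PySem.Set.ofList [a, b, c, d, e] = [a, b, c, d, e] := by
  apply PySem.Set.ofList_eq_self_of_nodup
  simp only [List.nodup_cons, List.mem_cons, List.not_mem_nil, List.nodup_nil,
    or_false, and_true, not_or, not_false_eq_true]
  omega

theorem pvPt2 {l : List Int} (hl : l.Pairwise (· < ·)) {i : ℕ} (hi : i < l.length) :
    aWin4g ((l.drop i).take 4) = bStep2 l l[i] := by
  by_cases hc : l[i] + 4 ∈ l ∧
      ((if l[i] + 1 ∈ l then 1 else 0) + (if l[i] + 2 ∈ l then 1 else 0) +
       (if l[i] + 3 ∈ l then 1 else 0) : Int) = 2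
  · obtain ⟨h4m, hcnt⟩ := hc
    have hcond : l[i] + 4 ∈ l ∧
        ((if l[i] + 1 ∈ l then 1 else 0) + (if l[i] + 2 ∈ l then 1 else 0) +
         (if l[i] + 3 ∈ l then 1 else 0) : Int) = 2 := ⟨h4m, hcnt⟩
    rw [bStep2, if_pos hcond]
    by_cases p1 : l[i] + 1 ∈ l <;> by_cases p2 : l[i] + 2 ∈ l <;> by_cases p3 : l[i] + 3 ∈ l
    · rw [if_pos p1, if_pos p2, if_pos p3] at hcnt; omega
    · -- present: +1, +2; missing +3
      obtain ⟨hi1, e1⟩ := (pvStep hl hi).mpr ⟨p1, by omega, fun u h1 h2 => absurd h1 (by omega)⟩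
      obtain ⟨hi2, e2⟩ := (pvStep hl hi1).mpr ⟨p2, by rw [e1]; omega, fun u h1 h2 => absurd (e1 ▸ h1) (by omega)⟩
      replace hi2 : i + 2 < l.length := hi2
      replace e2 : l[i + 2] = l[i] + 2 := e2
      obtain ⟨hi3, e3⟩ := (pvStep hl hi2).mpr
        ⟨h4m, by rw [e2]; omega, fun u h1 h2 => by rw [e2] at h1; rw [show u = l[i] + 3 by omega]; exact p3⟩
      replace hi3 : i + 3 < l.length := hi3
      replace e3 : l[i + 3] = l[i] + 4 := e3
      rw [pvDrop4 l hi3, e1, e2, e3]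
      simp only [aWin4g]
      rw [pvOfList4 _ _ _ _ (by omega) (by omega) (by omega)]
      have hgcond : (l[i] + 4 - l[i] = 4 ∧ ([l[i], l[i] + 1, l[i] + 2, l[i] + 4] : List Int).length = 4) := ⟨by omega, rfl⟩
      rw [if_pos hgcond, show l[i] + 4 + 1 = l[i] + 5 by omega, pvRange5,
          pvOfList5 _ _ _ _ _ (by omega) (by omega) (by omega) (by omega)]
      have hdiff : PySem.Set.diff [l[i], l[i] + 1, l[i] + 2, l[i] + 3, l[i] + 4]
          [l[i], l[i] + 1, l[i] + 2, l[i] + 4] = [l[i] + 3] := by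
        simp [PySem.Set.diff, PySem.Set.contains]
      rw [hdiff, List.find?_cons_of_neg (by simp [p1]), List.find?_cons_of_neg (by simp [p2]),
          List.find?_cons_of_pos (by simp [p3])]
    · -- present: +1, +3; missing +2
      obtain ⟨hi1, e1⟩ := (pvStep hl hi).mpr ⟨p1, by omega, fun u h1 h2 => absurd h1 (by omega)⟩
      obtain ⟨hi2, e2⟩ := (pvStep hl hi1).mpr
        ⟨p3, by rw [e1]; omega, fun u h1 h2 => by rw [e1] at h1; rw [show u = l[i] + 2 by omega]; exact p2⟩
      replace hi2 : i + 2 < l.length := hi2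
      replace e2 : l[i + 2] = l[i] + 3 := e2
      obtain ⟨hi3, e3⟩ := (pvStep hl hi2).mpr
        ⟨h4m, by rw [e2]; omega, fun u h1 h2 => absurd (e2 ▸ h1) (by omega)⟩
      replace hi3 : i + 3 < l.length := hi3
      replace e3 : l[i + 3] = l[i] + 4 := e3
      rw [pvDrop4 l hi3, e1, e2, e3]
      simp only [aWin4g]
      rw [pvOfList4 _ _ _ _ (by omega) (by omega) (by omega)]
      have hgcond : (l[i] + 4 - l[i] = 4 ∧ ([l[i], l[i] + 1, l[i] + 3, l[i] + 4] : List Int).length = 4) := ⟨by omega, rfl⟩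
      rw [if_pos hgcond, show l[i] + 4 + 1 = l[i] + 5 by omega, pvRange5,
          pvOfList5 _ _ _ _ _ (by omega) (by omega) (by omega) (by omega)]
      have hdiff : PySem.Set.diff [l[i], l[i] + 1, l[i] + 2, l[i] + 3, l[i] + 4]
          [l[i], l[i] + 1, l[i] + 3, l[i] + 4] = [l[i] + 2] := by
        simp [PySem.Set.diff, PySem.Set.contains]
      rw [hdiff, List.find?_cons_of_neg (by simp [p1]), List.find?_cons_of_pos (by simp [p2])]
    · rw [if_pos p1, if_neg p2, if_neg p3] at hcnt; omega
    · -- present: +2, +3; missing +1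
      obtain ⟨hi1, e1⟩ := (pvStep hl hi).mpr
        ⟨p2, by omega, fun u h1 h2 => by rw [show u = l[i] + 1 by omega]; exact p1⟩
      obtain ⟨hi2, e2⟩ := (pvStep hl hi1).mpr ⟨p3, by rw [e1]; omega, fun u h1 h2 => absurd (e1 ▸ h1) (by omega)⟩
      replace hi2 : i + 2 < l.length := hi2
      replace e2 : l[i + 2] = l[i] + 3 := e2
      obtain ⟨hi3, e3⟩ := (pvStep hl hi2).mpr
        ⟨h4m, by rw [e2]; omega, fun u h1 h2 => absurd (e2 ▸ h1) (by omega)⟩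
      replace hi3 : i + 3 < l.length := hi3
      replace e3 : l[i + 3] = l[i] + 4 := e3
      rw [pvDrop4 l hi3, e1, e2, e3]
      simp only [aWin4g]
      rw [pvOfList4 _ _ _ _ (by omega) (by omega) (by omega)]
      have hgcond : (l[i] + 4 - l[i] = 4 ∧ ([l[i], l[i] + 2, l[i] + 3, l[i] + 4] : List Int).length = 4) := ⟨by omega, rfl⟩
      rw [if_pos hgcond, show l[i] + 4 + 1 = l[i] + 5 by omega, pvRange5,
          pvOfList5 _ _ _ _ _ (by omega) (by omega) (by omega) (by omega)]
      have hdiff : PySem.Set.diff [l[i], l[i] + 1, l[i] + 2, l[i] + 3, l[i] + 4]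
          [l[i], l[i] + 2, l[i] + 3, l[i] + 4] = [l[i] + 1] := by
        simp [PySem.Set.diff, PySem.Set.contains]
      rw [hdiff, List.find?_cons_of_pos (by simp [p1])]
    · rw [if_neg p1, if_pos p2, if_neg p3] at hcnt; omega
    · rw [if_neg p1, if_neg p2, if_pos p3] at hcnt; omega
    · rw [if_neg p1, if_neg p2, if_neg p3] at hcnt; omega
  · rw [bStep2, if_neg hc]
    by_cases hlen : i + 3 < l.length
    · rw [pvDrop4 l hlen]
      simp only [aWin4g]
      rw [if_neg]
      rintro ⟨hspan, -⟩
      have a1 : l[i] < l[i + 1] := pvGetMono hl hi (by omega) (by omega)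
      have a2 : l[i + 1] < l[i + 2] := pvGetMono hl (by omega) (by omega) (by omega)
      have a3 : l[i + 2] < l[i + 3] := pvGetMono hl (by omega) (by omega) (by omega)
      have key : ∀ w : Int, l[i] < w → w < l[i + 3] → w ∈ l → w = l[i + 1] ∨ w = l[i + 2] := by
        intro w hw1 hw2 hwm
        by_contra hne
        rw [not_or] at hne
        rcases Int.lt_trichotomy w l[i + 1] with h | h | h
        · exact pvGap hl (by omega : i + 1 < l.length) w hw1 h hwm
        · exact hne.1 h
        · rcases Int.lt_trichotomy w l[i + 2] with h' | h' | h'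
          · exact pvGap hl (by omega : i + 1 + 1 < l.length) w h h' hwm
          · exact hne.2 h'
          · exact pvGap hl (by omega : i + 2 + 1 < l.length) w h' hw2 hwm
      have h4m : l[i] + 4 ∈ l := by
        have := List.getElem_mem (show i + 3 < l.length by omega)
        rwa [show l[i + 3] = l[i] + 4 by omega] at this
      have hmemiff : ∀ t : Int, l[i] < t → t < l[i] + 4 → (t ∈ l ↔ (t = l[i + 1] ∨ t = l[i + 2])) := by
        intro t ht1 ht2
        constructor
        · intro h; exact key t ht1 (by omega) h
        · rintro (rfl | rfl)
          · exact List.getElem_mem _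
          · exact List.getElem_mem _
      refine hc ⟨h4m, ?_⟩
      have hb : (l[i + 1] = l[i] + 1 ∧ l[i + 2] = l[i] + 2) ∨ (l[i + 1] = l[i] + 1 ∧ l[i + 2] = l[i] + 3) ∨
          (l[i + 1] = l[i] + 2 ∧ l[i + 2] = l[i] + 3) := by omega
      rcases hb with ⟨hb1, hb2⟩ | ⟨hb1, hb2⟩ | ⟨hb1, hb2⟩
      · rw [if_pos ((hmemiff (l[i] + 1) (by omega) (by omega)).mpr (Or.inl hb1.symm)),
            if_pos ((hmemiff (l[i] + 2) (by omega) (by omega)).mpr (Or.inr hb2.symm)),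
            if_neg (fun h => by rcases (hmemiff (l[i] + 3) (by omega) (by omega)).mp h with e | e <;> omega)]
        norm_num
      · rw [if_pos ((hmemiff (l[i] + 1) (by omega) (by omega)).mpr (Or.inl hb1.symm)),
            if_neg (fun h => by rcases (hmemiff (l[i] + 2) (by omega) (by omega)).mp h with e | e <;> omega),
            if_pos ((hmemiff (l[i] + 3) (by omega) (by omega)).mpr (Or.inr hb2.symm))]
        norm_num
      · rw [if_neg (fun h => by rcases (hmemiff (l[i] + 1) (by omega) (by omega)).mp h with e | e <;> omega),
            if_pos ((hmemiff (l[i] + 2) (by omega) (by omega)).mpr (Or.inl hb1.symm)),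
            if_pos ((hmemiff (l[i] + 3) (by omega) (by omega)).mpr (Or.inr hb2.symm))]
        norm_num
    · rw [pvShort4g _ (by simp only [List.length_take, List.length_drop]; omega)]

theorem pvPt3 {l : List Int} (hl : l.Pairwise (· < ·)) {i : ℕ} (hi : i < l.length) :
    aWin3o ((l.drop i).take 3) = bStep3 l l[i] := by
  by_cases hc : l[i] + 1 ∈ l ∧ l[i] + 2 ∈ l
  · obtain ⟨h1m, h2m⟩ := hc
    obtain ⟨hi1, e1⟩ := (pvStep hl hi).mpr ⟨h1m, by omega, fun u h1 h2 => absurd h1 (by omega)⟩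
    obtain ⟨hi2, e2⟩ := (pvStep hl hi1).mpr
      ⟨h2m, by rw [e1]; omega, fun u h1 h2 => absurd (e1 ▸ h1) (by omega)⟩
    replace hi2 : i + 2 < l.length := hi2
    replace e2 : l[i + 2] = l[i] + 2 := e2
    rw [pvDrop3 l hi2, e1, e2]
    simp only [aWin3o]
    rw [if_pos (by omega)]
    have hcond : l[i] + 1 ∈ l ∧ l[i] + 2 ∈ l := ⟨h1m, h2m⟩
    rw [bStep3, if_pos hcond]
    have h21 : l[i] + 2 + 1 = l[i] + 3 := by omega
    rw [h21]
  · rw [bStep3, if_neg hc]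
    by_cases hlen : i + 2 < l.length
    · rw [pvDrop3 l hlen]
      simp only [aWin3o]
      rw [if_neg]
      intro hspan
      have a1 : l[i] < l[i + 1] := pvGetMono hl hi (by omega) (by omega)
      have a2 : l[i + 1] < l[i + 2] := pvGetMono hl (by omega) (by omega) (by omega)
      refine hc ⟨?_, ?_⟩
      · have := List.getElem_mem (show i + 1 < l.length by omega)
        rwa [show l[i + 1] = l[i] + 1 by omega] at this
      · have := List.getElem_mem (show i + 2 < l.length by omega)
        rwa [show l[i + 2] = l[i] + 2 by omega] at this
    · rw [pvShort3o _ (by simp only [List.length_take, List.length_drop]; omega)]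

theorem pvPt4 {l : List Int} (hl : l.Pairwise (· < ·)) {i : ℕ} (hi : i < l.length) :
    aWin3g ((l.drop i).take 3) = bStep4 l l[i] := by
  by_cases hc1 : l[i] + 3 ∈ l ∧ ((if l[i] + 1 ∈ l then 1 else 0) + (if l[i] + 2 ∈ l then 1 else 0) : Int) = 1
  · rw [bStep4, if_pos hc1]
    obtain ⟨h3m, hcnt⟩ := hc1
    by_cases p1 : l[i] + 1 ∈ l <;> by_cases p2 : l[i] + 2 ∈ l
    · rw [if_pos p1, if_pos p2] at hcnt; omega
    · obtain ⟨hi1, e1⟩ := (pvStep hl hi).mpr ⟨p1, by omega, fun u h1 h2 => absurd h1 (by omega)⟩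
      obtain ⟨hi2, e2⟩ := (pvStep hl hi1).mpr
        ⟨h3m, by rw [e1]; omega, fun u h1 h2 => by rw [e1] at h1; rw [show u = l[i] + 2 by omega]; exact p2⟩
      replace hi2 : i + 2 < l.length := hi2
      replace e2 : l[i + 2] = l[i] + 3 := e2
      rw [pvDrop3 l hi2, e1, e2]
      simp only [aWin3g]
      rw [if_pos (Or.inl (by omega)), pvRange2]
    · obtain ⟨hi1, e1⟩ := (pvStep hl hi).mpr
        ⟨p2, by omega, fun u h1 h2 => by rw [show u = l[i] + 1 by omega]; exact p1⟩
      obtain ⟨hi2, e2⟩ := (pvStep hl hi1).mpr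
        ⟨h3m, by rw [e1]; omega, fun u h1 h2 => absurd (e1 ▸ h1) (by omega)⟩
      replace hi2 : i + 2 < l.length := hi2
      replace e2 : l[i + 2] = l[i] + 3 := e2
      rw [pvDrop3 l hi2, e1, e2]
      simp only [aWin3g]
      rw [if_pos (Or.inl (by omega)), pvRange2]
    · rw [if_neg p1, if_neg p2] at hcnt; omega
  · by_cases hc2 : l[i] + 4 ∈ l ∧
        ((if l[i] + 1 ∈ l then 1 else 0) + (if l[i] + 2 ∈ l then 1 else 0) +
         (if l[i] + 3 ∈ l then 1 else 0) : Int) = 1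
    · rw [bStep4, if_neg hc1, if_pos hc2]
      obtain ⟨h4m, hcnt⟩ := hc2
      by_cases p1 : l[i] + 1 ∈ l <;> by_cases p2 : l[i] + 2 ∈ l <;> by_cases p3 : l[i] + 3 ∈ l
      · rw [if_pos p1, if_pos p2, if_pos p3] at hcnt; omega
      · rw [if_pos p1, if_pos p2, if_neg p3] at hcnt; omega
      · rw [if_pos p1, if_neg p2, if_pos p3] at hcnt; omega
      · -- only +1 present
        obtain ⟨hi1, e1⟩ := (pvStep hl hi).mpr ⟨p1, by omega, fun u h1 h2 => absurd h1 (by omega)⟩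
        obtain ⟨hi2, e2⟩ := (pvStep hl hi1).mpr
          ⟨h4m, by rw [e1]; omega, fun u h1 h2 => by
            rw [e1] at h1
            rcases (show u = l[i] + 2 ∨ u = l[i] + 3 by omega) with hu | hu
            · rw [hu]; exact p2
            · rw [hu]; exact p3⟩
        replace hi2 : i + 2 < l.length := hi2
        replace e2 : l[i + 2] = l[i] + 4 := e2
        rw [pvDrop3 l hi2, e1, e2]
        simp only [aWin3g]
        rw [if_pos (Or.inr (by omega)), pvRange3]
      · rw [if_neg p1, if_pos p2, if_pos p3] at hcnt; omega
      · -- only +2 present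
        obtain ⟨hi1, e1⟩ := (pvStep hl hi).mpr
          ⟨p2, by omega, fun u h1 h2 => by rw [show u = l[i] + 1 by omega]; exact p1⟩
        obtain ⟨hi2, e2⟩ := (pvStep hl hi1).mpr
          ⟨h4m, by rw [e1]; omega, fun u h1 h2 => by
            rw [e1] at h1
            rw [show u = l[i] + 3 by omega]; exact p3⟩
        replace hi2 : i + 2 < l.length := hi2
        replace e2 : l[i + 2] = l[i] + 4 := e2
        rw [pvDrop3 l hi2, e1, e2]
        simp only [aWin3g]
        rw [if_pos (Or.inr (by omega)), pvRange3]
      · -- only +3 present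
        obtain ⟨hi1, e1⟩ := (pvStep hl hi).mpr
          ⟨p3, by omega, fun u h1 h2 => by
            rcases (show u = l[i] + 1 ∨ u = l[i] + 2 by omega) with hu | hu
            · rw [hu]; exact p1
            · rw [hu]; exact p2⟩
        obtain ⟨hi2, e2⟩ := (pvStep hl hi1).mpr
          ⟨h4m, by rw [e1]; omega, fun u h1 h2 => absurd (e1 ▸ h1) (by omega)⟩
        replace hi2 : i + 2 < l.length := hi2
        replace e2 : l[i + 2] = l[i] + 4 := e2
        rw [pvDrop3 l hi2, e1, e2]
        simp only [aWin3g]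
        rw [if_pos (Or.inr (by omega)), pvRange3]
      · rw [if_neg p1, if_neg p2, if_neg p3] at hcnt; omega
    · rw [bStep4, if_neg hc1, if_neg hc2]
      by_cases hlen : i + 2 < l.length
      · rw [pvDrop3 l hlen]
        simp only [aWin3g]
        rw [if_neg]
        have a1 : l[i] < l[i + 1] := pvGetMono hl hi (by omega) (by omega)
        have a2 : l[i + 1] < l[i + 2] := pvGetMono hl (by omega) (by omega) (by omega)
        have key : ∀ w : Int, l[i] < w → w < l[i + 2] → w ∈ l → w = l[i + 1] := by
          intro w hw1 hw2 hwm
          rcases Int.lt_trichotomy w l[i + 1] with h | h | h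
          · exact absurd hwm (pvGap hl (by omega : i + 1 < l.length) w hw1 h)
          · exact h
          · exact absurd hwm (pvGap hl (by omega : i + 1 + 1 < l.length) w h hw2)
        have hmem1 : l[i + 1] ∈ l := List.getElem_mem _
        have hmem2 : l[i + 2] ∈ l := List.getElem_mem _
        rintro (hspan | hspan)
        · refine hc1 ⟨by rwa [show l[i + 2] = l[i] + 3 by omega] at hmem2, ?_⟩
          rcases (show l[i + 1] = l[i] + 1 ∨ l[i + 1] = l[i] + 2 by omega) with hb | hb
          · rw [if_pos (by rwa [hb] at hmem1),
                if_neg (fun h => by have := key _ (by omega) (by omega) h; omega)]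
            norm_num
          · rw [if_neg (fun h => by have := key _ (by omega) (by omega) h; omega),
                if_pos (by rwa [hb] at hmem1)]
            norm_num
        · refine hc2 ⟨by rwa [show l[i + 2] = l[i] + 4 by omega] at hmem2, ?_⟩
          rcases (show l[i + 1] = l[i] + 1 ∨ l[i + 1] = l[i] + 2 ∨ l[i + 1] = l[i] + 3 by omega) with hb | hb | hb
          · rw [if_pos (by rwa [hb] at hmem1),
                if_neg (fun h => by have := key _ (by omega) (by omega) h; omega),
                if_neg (fun h => by have := key _ (by omega) (by omega) h; omega)]
            norm_num
          · rw [if_neg (fun h => by have := key _ (by omega) (by omega) h; omega),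
                if_pos (by rwa [hb] at hmem1),
                if_neg (fun h => by have := key _ (by omega) (by omega) h; omega)]
            norm_num
          · rw [if_neg (fun h => by have := key _ (by omega) (by omega) h; omega),
                if_neg (fun h => by have := key _ (by omega) (by omega) h; omega),
                if_pos (by rwa [hb] at hmem1)]
            norm_num
      · rw [pvShort3g _ (by simp only [List.length_take, List.length_drop]; omega)]

-- B's step bodies only inspect the set through membership
theorem pvStepCongr (s t : List Int) (hst : ∀ x : Int, x ∈ s ↔ x ∈ t) (v : Int) :
    bStep1 s v = bStep1 t v ∧ bStep2 s v = bStep2 t v ∧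
    bStep3 s v = bStep3 t v ∧ bStep4 s v = bStep4 t v := by
  refine ⟨?_, ?_, ?_, ?_⟩ <;> simp only [bStep1, bStep2, bStep3, bStep4, hst]

theorem pvPass1 {l : List Int} (hl : l.Pairwise (· < ·)) :
    aPass1 l = l.findSome? (bStep1 l) := by
  unfold aPass1
  refine pvScanBridge l 3 _ (bStep1 l) ?_ ?_
  · intro i hi
    have h4 : ((i : Int) + 4) = ((i : Int) + ((4 : ℕ) : Int)) := by norm_num
    rw [h4, PySem.List.slice_natCast_add]
    exact pvPt1 hl hi
  · intro i hi hle
    rw [← pvPt1 hl hi]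
    apply pvShort4o
    simp only [List.length_take, List.length_drop]
    omega

theorem pvPass2 {l : List Int} (hl : l.Pairwise (· < ·)) :
    aPass2 l = l.findSome? (bStep2 l) := by
  unfold aPass2
  refine pvScanBridge l 3 _ (bStep2 l) ?_ ?_
  · intro i hi
    have h4 : ((i : Int) + 4) = ((i : Int) + ((4 : ℕ) : Int)) := by norm_num
    rw [h4, PySem.List.slice_natCast_add]
    exact pvPt2 hl hi
  · intro i hi hle
    rw [← pvPt2 hl hi]
    apply pvShort4g
    simp only [List.length_take, List.length_drop]
    omega

theorem pvPass3 {l : List Int} (hl : l.Pairwise (· < ·)) :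
    aPass3 l = l.findSome? (bStep3 l) := by
  unfold aPass3
  refine pvScanBridge l 2 _ (bStep3 l) ?_ ?_
  · intro i hi
    have h4 : ((i : Int) + 3) = ((i : Int) + ((3 : ℕ) : Int)) := by norm_num
    rw [h4, PySem.List.slice_natCast_add]
    exact pvPt3 hl hi
  · intro i hi hle
    rw [← pvPt3 hl hi]
    apply pvShort3o
    simp only [List.length_take, List.length_drop]
    omega

theorem pvPass4 {l : List Int} (hl : l.Pairwise (· < ·)) :
    aPass4 l = l.findSome? (bStep4 l) := by
  unfold aPass4
  refine pvScanBridge l 2 _ (bStep4 l) ?_ ?_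
  · intro i hi
    have h4 : ((i : Int) + 3) = ((i : Int) + ((3 : ℕ) : Int)) := by norm_num
    rw [h4, PySem.List.slice_natCast_add]
    exact pvPt4 hl hi
  · intro i hi hle
    rw [← pvPt4 hl hi]
    apply pvShort3g
    simp only [List.length_take, List.length_drop]
    omega

-- ===== VERDICT (by name: the statement is the Claim_ definition above) =====
theorem find_best_board_straight_draw_py_spec : Claim_equal_find_best_board_straight_draw_py := by
  intro community_cards _ hPre
  unfold Spec_find_best_board_straight_draw_py
  unfold find_best_board_straight_draw_py find_best_board_straight_draw_py_alt
  by_cases hlen : community_cards.length < 3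
  · simp [hlen]
  · simp only [hlen, if_false]
    obtain ⟨hord, hsorted, hmem⟩ := pvRanks community_cards hPre
    rw [hord]
    have hcongr : ∀ v : Int,
        bStep1 (bRset community_cards) v = bStep1 (aRanks community_cards) v ∧
        bStep2 (bRset community_cards) v = bStep2 (aRanks community_cards) v ∧
        bStep3 (bRset community_cards) v = bStep3 (aRanks community_cards) v ∧
        bStep4 (bRset community_cards) v = bStep4 (aRanks community_cards) v := by
      intro v
      exact pvStepCongr _ _ (fun x => (hmem x).trans (Iff.rfl)) v
    have e1 : (aRanks community_cards).findSome? (bStep1 (bRset community_cards)) =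
        (aRanks community_cards).findSome? (bStep1 (aRanks community_cards)) :=
      pvFindSomeCongr _ _ _ (fun v _ => (hcongr v).1)
    have e2 : (aRanks community_cards).findSome? (bStep2 (bRset community_cards)) =
        (aRanks community_cards).findSome? (bStep2 (aRanks community_cards)) :=
      pvFindSomeCongr _ _ _ (fun v _ => (hcongr v).2.1)
    have e3 : (aRanks community_cards).findSome? (bStep3 (bRset community_cards)) =
        (aRanks community_cards).findSome? (bStep3 (aRanks community_cards)) :=
      pvFindSomeCongr _ _ _ (fun v _ => (hcongr v).2.2.1)
    have e4 : (aRanks community_cards).findSome? (bStep4 (bRset community_cards)) =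
        (aRanks community_cards).findSome? (bStep4 (aRanks community_cards)) :=
      pvFindSomeCongr _ _ _ (fun v _ => (hcongr v).2.2.2)
    rw [e1, e2, e3, e4, ← pvPass1 hsorted, ← pvPass2 hsorted, ← pvPass3 hsorted, ← pvPass4 hsorted]
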